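-- pv_equiv track=rewrite | github.com/zackees/pio-compiler | src/pio_compiler/cache_manager.py | _pre_sanitize_name
-- ===== SOURCE A (Python) =====
-- class InvalidCacheNameError(Exception):
--     """Raised when a cache name contains invalid characters for filesystem use."""
--
--     pass
--
-- def _pre_sanitize_name(name: str) -> str:
--     """Pre-sanitize a name by applying basic transformations before validation.
--
--     This method applies minimal transformations to make names more likely to pass
--     validation, but still rejects fundamentally problematic names.
--     """
--     if not name or not name.strip():
--         raise InvalidCacheNameError("Name cannot be empty or only whitespace")
--
--     # Remove leading/trailing whitespace
--     sanitized = name.strip()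
--
--     # Replace common filesystem-unsafe characters with safe alternatives
--     replacements = {
--         "/": "_",  # Path separator
--         "\\": "_",  # Windows path separator
--         ":": "_",  # Drive separator on Windows
--         " ": "_",  # Spaces can be problematic
--     }
--
--     for old, new in replacements.items():
--         sanitized = sanitized.replace(old, new)
--
--     return sanitized
-- ===== SOURCE B (Python) =====
-- class InvalidCacheNameError(Exception):
--     """Raised when a cache name contains invalid characters for filesystem use."""
--
--     pass
--
--
-- _SAFE = {"/": "_", "\\": "_", ":": "_", " ": "_"}
--
--
-- def _pre_sanitize_name(name: str) -> str:
--     """Single character-level pass: map each character of the stripped name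
--     through a lookup table instead of four sequential whole-string replaces."""
--     if not name or not name.strip():
--         raise InvalidCacheNameError("Name cannot be empty or only whitespace")
--     return "".join(_SAFE.get(c, c) for c in name.strip())
-- ===== Notes on version B (the rewrite author's own statement) =====
-- stated objective: simpler
-- what changed: Replaces four sequential whole-string .replace() passes by one character-level pass that maps each character of the stripped name through a lookup table and joins the result.
import Mathlib
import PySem

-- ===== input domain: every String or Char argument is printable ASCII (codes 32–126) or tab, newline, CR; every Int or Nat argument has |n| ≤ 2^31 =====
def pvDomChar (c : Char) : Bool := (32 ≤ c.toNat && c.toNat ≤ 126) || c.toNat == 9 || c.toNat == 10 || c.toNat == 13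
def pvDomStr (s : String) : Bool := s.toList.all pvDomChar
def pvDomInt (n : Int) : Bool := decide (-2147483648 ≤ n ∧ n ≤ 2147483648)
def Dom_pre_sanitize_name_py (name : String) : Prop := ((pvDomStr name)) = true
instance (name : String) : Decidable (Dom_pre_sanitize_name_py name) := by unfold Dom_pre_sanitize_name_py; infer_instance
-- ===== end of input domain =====

-- B replaces A's four sequential whole-string replace passes by one character-level
-- pass through a lookup table (objective: simpler).

-- ===== PORT A =====
-- A's replacement dict, iterated in insertion order by the for loop.
def pvReplacements : List (String × String) := [("/", "_"), ("\\", "_"), (":", "_"), (" ", "_")]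

def pre_sanitize_name_py (name : String) : String :=
  -- guard 'if not name or not name.strip(): raise' is excluded by Pre_
  let sanitized := PySem.Str.strip name
  pvReplacements.foldl (fun s p => PySem.Str.replace s p.1 p.2) sanitized

-- ===== PORT B =====
-- B's lookup table _SAFE (values are single characters).
def pvSafe : PySem.Dict Char Char :=
  ((((PySem.Dict.empty).insert '/' '_').insert '\\' '_').insert ':' '_').insert ' ' '_'

def pre_sanitize_name_py_alt (name : String) : String :=
  -- same guard, excluded by Pre_; then ''.join(_SAFE.get(c, c) for c in name.strip())
  String.ofList ((PySem.Str.strip name).toList.map (fun c => pvSafe.getD c c))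

-- ===== PRECONDITION & SPEC =====
-- Pre_ excludes exactly the inputs on which A raises InvalidCacheNameError:
-- names that are empty or only whitespace (both programs raise there).
def Pre_pre_sanitize_name_py (name : String) : Prop := PySem.Str.strip name ≠ ""
instance (name : String) : Decidable (Pre_pre_sanitize_name_py name) := by
  unfold Pre_pre_sanitize_name_py; infer_instance

def pvWitness_pre_sanitize_name_py : String := " a/b c "

def Spec_pre_sanitize_name_py (name : String) (out : String) : Prop := out = pre_sanitize_name_py_alt name
instance (name : String) (out : String) : Decidable (Spec_pre_sanitize_name_py name out) := by unfold Spec_pre_sanitize_name_py; infer_instance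

-- ===== CLAIM (what is proved, stated in full; the proofs are below) =====
def Claim_equal_pre_sanitize_name_py : Prop := ∀ (name : String), Dom_pre_sanitize_name_py name → Pre_pre_sanitize_name_py name → Spec_pre_sanitize_name_py name (pre_sanitize_name_py name)

-- ===== LEMMAS AND PROOFS =====

-- replace.go with a single-character pattern is a pointwise map
lemma replace_go_single (o n : Char) :
    ∀ (fuel : Nat) (l acc : List Char), l.length ≤ fuel →
      PySem.Chars.replace.go [o] [n] fuel l acc
        = acc.reverse ++ l.map (fun c => if c = o then n else c) := by
  intro fuel
  induction fuel with
  | zero =>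
    intro l acc h
    have : l = [] := List.eq_nil_of_length_eq_zero (Nat.le_zero.mp h)
    subst this
    simp [PySem.Chars.replace.go]
  | succ k ih =>
    intro l acc h
    cases l with
    | nil => simp [PySem.Chars.replace.go]
    | cons c t =>
      simp only [PySem.Chars.replace.go]
      by_cases hc : c = o
      · subst hc
        have hpre : [c].isPrefixOf (c :: t) = true := by
          simp [List.isPrefixOf]
        rw [if_pos hpre]
        have := ih t ([n].reverse ++ acc) (by simpa using Nat.le_of_succ_le_succ h)
        simpa using this
      · have hpre : [o].isPrefixOf (c :: t) = false := by
          simp [List.isPrefixOf]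
          exact fun hh => (hc hh.symm).elim
        rw [if_neg (by simp [hpre])]
        have := ih t (c :: acc) (by simpa using Nat.le_of_succ_le_succ h)
        rw [this]
        simp [hc]

-- single-character replace is map
lemma replace_single (s : List Char) (o n : Char) :
    PySem.Chars.replace s [o] [n] = s.map (fun c => if c = o then n else c) := by
  simp only [PySem.Chars.replace, List.isEmpty_cons]
  exact (by simpa using replace_go_single o n s.length s [] (le_refl _))

theorem pre_sanitize_name_py_spec : Claim_equal_pre_sanitize_name_py := by
  intro name _ _
  unfold Spec_pre_sanitize_name_py pre_sanitize_name_py pre_sanitize_name_py_alt pvReplacements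
  simp only [List.foldl]
  -- reduce A's four Str.replace passes to maps over the char list
  have h : ∀ (s : String) (o n : Char),
      PySem.Str.replace s (String.ofList [o]) (String.ofList [n])
        = String.ofList (s.toList.map (fun c => if c = o then n else c)) := by
    intro s o n
    apply String.toList_injective
    rw [PySem.Str.toList_replace, String.toList_ofList, String.toList_ofList,
        String.toList_ofList, replace_single]
  have e1 : ("/" : String) = String.ofList ['/'] := by decide
  have e2 : ("\\" : String) = String.ofList ['\\'] := by decide
  have e3 : (":" : String) = String.ofList [':'] := by decide
  have e4 : (" " : String) = String.ofList [' '] := by decide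
  have e5 : ("_" : String) = String.ofList ['_'] := by decide
  rw [e1, e2, e3, e4, e5, h, h, h, h, String.toList_ofList, String.toList_ofList,
      String.toList_ofList, List.map_map, List.map_map, List.map_map]
  refine congrArg String.ofList (List.map_congr_left ?_)
  intro c _
  simp only [Function.comp]
  simp only [pvSafe, PySem.Dict.getD_insert]
  split_ifs <;> simp_all

-- ===== VERDICT (by name: the statement is the Claim_ definition above) =====
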